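-- pv_equiv track=rewrite | github.com/facebookresearch/TaBERT | preprocess/htmltable.py | merge_header_rows
-- ===== SOURCE A (Python) =====
-- def transpose(rows):
--     cols = []
--     n = max(len(row) for row in rows)
--     for i in range(n):
--         col = []
--         for row in rows:
--             try:
--                 col.append(row[i])
--             except LookupError:
--                 col.append(('', ''))
--         cols.append(col)
--     return cols
--
-- def merge_header_rows(orig_rows):
--     """Merge all header rows together."""
--     header_rows, body_rows = [], []
--     still_header = True
--     for row in orig_rows:
--         if not still_header or any(cell[0] == 'td' for cell in row):
--             still_header = False
--             body_rows.append(row)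
--         else:
--             header_rows.append(row)
--     if len(header_rows) < 2 or not body_rows:
--         return orig_rows
--     # Merge header rows with '\n'
--     header_cols = transpose(header_rows)
--     header_row = []
--     for col in header_cols:
--         texts = [None]
--         for cell in col:
--             if cell[1] != texts[-1]:
--                 texts.append(cell[1])
--         header_row.append(('th', '\n'.join(texts[1:])))
--     return [header_row] + body_rows
-- ===== SOURCE B (Python) =====
-- def merge_header_rows(orig_rows):
--     """Merge all header rows together (single row-major streaming pass, no transpose)."""
--     header_rows, body_rows = [], []
--     still_header = True
--     for row in orig_rows:
--         if still_header and all(cell[0] != 'td' for cell in row):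
--             header_rows.append(row)
--         else:
--             still_header = False
--             body_rows.append(row)
--     if len(header_rows) < 2 or not body_rows:
--         return orig_rows
--     ncols = max(len(row) for row in header_rows)
--     accs = [[] for _ in range(ncols)]
--     lasts = [None] * ncols
--     for row in header_rows:
--         for i in range(ncols):
--             text = row[i][1] if i < len(row) else ''
--             if text != lasts[i]:
--                 accs[i].append(text)
--                 lasts[i] = text
--     return [[('th', '\n'.join(acc)) for acc in accs]] + body_rows
-- ===== Notes on version B (the rewrite author's own statement) =====
-- stated objective: alternative
-- what changed: Replaces the transpose helper and column-major merge with a single row-major streaming pass over the header rows that maintains per-column accumulators and last-seen sentinels.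
import Mathlib
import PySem

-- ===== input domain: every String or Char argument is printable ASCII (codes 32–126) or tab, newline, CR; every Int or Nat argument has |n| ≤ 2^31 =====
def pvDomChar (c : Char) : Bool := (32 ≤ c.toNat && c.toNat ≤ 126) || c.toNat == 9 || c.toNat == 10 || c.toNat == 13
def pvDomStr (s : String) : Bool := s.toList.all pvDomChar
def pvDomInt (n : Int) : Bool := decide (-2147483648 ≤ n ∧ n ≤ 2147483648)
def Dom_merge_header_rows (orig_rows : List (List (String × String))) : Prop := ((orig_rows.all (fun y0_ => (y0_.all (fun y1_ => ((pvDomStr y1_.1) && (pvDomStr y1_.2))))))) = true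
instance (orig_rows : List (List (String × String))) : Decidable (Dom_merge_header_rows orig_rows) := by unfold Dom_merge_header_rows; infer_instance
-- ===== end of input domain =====

-- B replaces A's transpose + column-major merge with one row-major streaming pass over the
-- header rows keeping per-column accumulators and last-seen sentinels (objective: alternative).

-- ===== PORT A =====

-- max(len(row) for row in rows); on the nonempty lists it is applied to, foldl max 0 is that max
def pyMaxLen (rows : List (List (String × String))) : Nat :=
  rows.foldl (fun m r => max m r.length) 0

-- transpose: row[i] with try/except LookupError padding to ('','')
def transposeA (rows : List (List (String × String))) : List (List (String × String)) :=
  (List.range (pyMaxLen rows)).map (fun i => rows.map (fun row => row.getD i ("", "")))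

-- the partition loop body: state (header_rows, body_rows, still_header)
def partStepA (st : List (List (String × String)) × List (List (String × String)) × Bool)
    (row : List (String × String)) :
    List (List (String × String)) × List (List (String × String)) × Bool :=
  if !st.2.2 || row.any (fun cell => cell.1 == "td") then (st.1, st.2.1 ++ [row], false)
  else (st.1 ++ [row], st.2.1, st.2.2)

-- inner loop: texts = [None]; append cell[1] when it differs from texts[-1]
def textsStep (ts : List (Option String)) (cell : String × String) : List (Option String) :=
  if some cell.2 ≠ ts.getLastD none then ts ++ [some cell.2] else ts

def merge_header_rows (orig_rows : List (List (String × String))) : List (List (String × String)) :=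
  let st := orig_rows.foldl partStepA ([], [], true)
  let header_rows := st.1
  let body_rows := st.2.1
  if header_rows.length < 2 || body_rows.isEmpty then orig_rows
  else
    let header_cols := transposeA header_rows
    let header_row := header_cols.map (fun col =>
      let texts := col.foldl textsStep [none]
      ("th", String.intercalate "\n" ((texts.drop 1).map (fun o => o.getD ""))))
    [header_row] ++ body_rows

-- ===== PORT B =====

-- partition loop of Source B: header while still_header and no 'td' cell
def partStepB (st : List (List (String × String)) × List (List (String × String)) × Bool)
    (row : List (String × String)) :
    List (List (String × String)) × List (List (String × String)) × Bool :=
  if st.2.2 && row.all (fun cell => cell.1 != "td") then (st.1 ++ [row], st.2.1, st.2.2)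
  else (st.1, st.2.1 ++ [row], false)

-- per-column update: append text when it differs from the last-seen sentinel
def colStep (p : List String × Option String) (text : String) : List String × Option String :=
  if some text ≠ p.2 then (p.1 ++ [text], some text) else p

-- inner 'for i in range(ncols)' loop over the per-column states (accs[i], lasts[i])
def rowStep (st : List (List String × Option String)) (row : List (String × String)) :
    List (List String × Option String) :=
  st.zipIdx.map (fun pi =>
    let text := if pi.2 < row.length then (row.getD pi.2 ("", "")).2 else ""
    colStep pi.1 text)

def merge_header_rows_alt (orig_rows : List (List (String × String))) : List (List (String × String)) :=
  let st := orig_rows.foldl partStepB ([], [], true)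
  let header_rows := st.1
  let body_rows := st.2.1
  if header_rows.length < 2 || body_rows.isEmpty then orig_rows
  else
    let ncols := pyMaxLen header_rows
    let final := header_rows.foldl rowStep (List.replicate ncols ([], none))
    [final.map (fun p => ("th", String.intercalate "\n" p.1))] ++ body_rows

-- ===== PRECONDITION & SPEC =====
def Spec_merge_header_rows (orig_rows : List (List (String × String))) (out : List (List (String × String))) : Prop := out = merge_header_rows_alt orig_rows
instance (orig_rows : List (List (String × String))) (out : List (List (String × String))) : Decidable (Spec_merge_header_rows orig_rows out) := by unfold Spec_merge_header_rows; infer_instance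

-- ===== CLAIM (what is proved, stated in full; the proofs are below) =====
def Claim_equal_merge_header_rows : Prop := ∀ (orig_rows : List (List (String × String))), Dom_merge_header_rows orig_rows → Spec_merge_header_rows orig_rows (merge_header_rows orig_rows)

-- ===== LEMMAS AND PROOFS =====

theorem partStep_eq : partStepA = partStepB := by
  funext st row
  obtain ⟨h, b, s⟩ := st
  cases s <;> cases hr : row.any (fun cell => cell.1 == "td") <;>
    simp [partStepA, partStepB, List.all_eq_not_any_not, hr, bne]

theorem rowStep_length (st : List (List String × Option String)) (row : List (String × String)) :
    (rowStep st row).length = st.length := by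
  simp [rowStep]

-- the text picked for column i equals (row.getD i ('','')).2 even when i is out of range
theorem text_eq (row : List (String × String)) (i : Nat) :
    (if i < row.length then (row[i]?.getD ("", "")).2 else "") = (row[i]?.getD ("", "")).2 := by
  split
  · rfl
  · rw [List.getElem?_eq_none (by omega)]; rfl

theorem rowStep_getElem? (st : List (List String × Option String)) (row : List (String × String))
    (i : Nat) (hi : i < st.length) :
    (rowStep st row)[i]? = some (colStep st[i] ((row.getD i ("", "")).2)) := by
  simp only [rowStep, List.getElem?_map, List.getElem?_zipIdx,
    List.getElem?_eq_getElem hi, Option.map_some, List.getD]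
  rw [Nat.zero_add, text_eq]

theorem foldl_rowStep_length (rows : List (List (String × String)))
    (st : List (List String × Option String)) :
    (rows.foldl rowStep st).length = st.length := by
  induction rows generalizing st with
  | nil => rfl
  | cons r rs ih => simp [List.foldl_cons, ih, rowStep_length]

theorem foldl_rowStep_getElem? (rows : List (List (String × String)))
    (st : List (List String × Option String)) (i : Nat) (hi : i < st.length) :
    (rows.foldl rowStep st)[i]? =
      some (rows.foldl (fun p row => colStep p ((row.getD i ("", "")).2)) st[i]) := by
  induction rows generalizing st with
  | nil => simp [List.getElem?_eq_getElem hi]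
  | cons r rs ih =>
      have hi' : i < (rowStep st r).length := by rw [rowStep_length]; exact hi
      have hrec := ih (rowStep st r) hi'
      have h2 := rowStep_getElem? st r i hi
      rw [List.getElem?_eq_getElem hi'] at h2
      simp only [Option.some.injEq] at h2
      rw [List.foldl_cons, hrec, h2, List.foldl_cons]

theorem textsStep_of_eq (ts : List (Option String)) (last : Option String) (c : String × String)
    (hl : ts.getLastD none = last) (h : some c.2 = last) : textsStep ts c = ts := by
  unfold textsStep
  rw [hl, if_neg (not_not_intro h)]

theorem textsStep_of_ne (ts : List (Option String)) (last : Option String) (c : String × String)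
    (hl : ts.getLastD none = last) (h : some c.2 ≠ last) : textsStep ts c = ts ++ [some c.2] := by
  unfold textsStep
  rw [hl, if_pos h]

theorem colStep_of_eq (p : List String × Option String) (t : String)
    (h : some t = p.2) : colStep p t = p := by
  simp [colStep, h]

theorem colStep_of_ne (p : List String × Option String) (t : String)
    (h : some t ≠ p.2) : colStep p t = (p.1 ++ [t], some t) := by
  simp [colStep, h]

-- the per-column correspondence between A's texts list and B's (acc, last) pair
theorem col_corr (cells : List (String × String)) (acc : List String) (last : Option String)
    (hl : (none :: acc.map some).getLastD none = last) :
    cells.foldl textsStep (none :: acc.map some)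
      = none :: (cells.foldl (fun p cell => colStep p cell.2) (acc, last)).1.map some := by
  induction cells generalizing acc last with
  | nil => rfl
  | cons c cs ih =>
      simp only [List.foldl_cons]
      by_cases h : some c.2 = last
      · rw [textsStep_of_eq _ last _ hl h, colStep_of_eq _ _ h]
        exact ih acc last hl
      · rw [textsStep_of_ne _ last _ hl h, colStep_of_ne _ _ h]
        have h' : ((none : Option String) :: (acc ++ [c.2]).map some).getLastD none = some c.2 := by
          have e : (none : Option String) :: (acc ++ [c.2]).map some
              = (none :: acc.map some) ++ [some c.2] := by simp
          rw [e, List.getLastD_concat]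
        simpa using ih (acc ++ [c.2]) (some c.2) h'

-- ===== VERDICT (by name: the statement is the Claim_ definition above) =====
theorem merge_header_rows_spec : Claim_equal_merge_header_rows := by
  intro orig_rows _
  show merge_header_rows orig_rows = merge_header_rows_alt orig_rows
  simp only [merge_header_rows, merge_header_rows_alt]
  rw [partStep_eq]
  set st := orig_rows.foldl partStepB ([], [], true) with hst
  by_cases hc : (decide (st.1.length < 2) || st.2.1.isEmpty) = true
  · rw [if_pos hc, if_pos hc]
  · rw [if_neg hc, if_neg hc]
    congr 1
    congr 1
    simp only [transposeA]
    set n := pyMaxLen st.1 with hn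
    apply List.ext_getElem?
    intro i
    simp only [List.getElem?_map]
    by_cases hi : i < n
    · have hi' : i < (List.replicate n (([] : List String), (none : Option String))).length := by
        simpa using hi
      have hB := foldl_rowStep_getElem? st.1 (List.replicate n ([], none)) i hi'
      rw [List.getElem_replicate] at hB
      rw [List.getElem?_range hi, hB]
      simp only [Option.map_some, Option.some.injEq]
      -- per-column equality
      have hcorr := col_corr (st.1.map (fun row => row.getD i ("", ""))) [] none rfl
      simp only [List.map_nil] at hcorr
      rw [hcorr, List.foldl_map]
      simp [List.map_map]
    · rw [List.getElem?_eq_none (by simpa using hi),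
        List.getElem?_eq_none (by rw [foldl_rowStep_length, List.length_replicate]; omega)]
      rfl
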